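-- pv_equiv track=rewrite | github.com/phatryun/Advent_code | 2020/day 17/Exercice17.py | createSpaceWithActivePoint
-- ===== SOURCE A (Python) =====
-- from operator import itemgetter
--
-- def createSpaceWithActivePoint(list_active_point) :
--     x_min, x_max = min(list_active_point,key=itemgetter(0))[0], max(list_active_point,key=itemgetter(0))[0]
--     y_min, y_max = min(list_active_point,key=itemgetter(1))[1], max(list_active_point,key=itemgetter(1))[1]
--     z_min, z_max = min(list_active_point,key=itemgetter(2))[2], max(list_active_point,key=itemgetter(2))[2]
--
--     dict_z = dict()
--     for z in range(z_min, z_max + 1) :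
--         dict_y = dict()
--         for y in range(y_min, y_max + 1) :
--             dict_x = dict()
--             for x in range(x_min, x_max + 1) :
--                 if (x, y, z) in list_active_point :
--                     dict_x[x] = "#"
--                 else :
--                     dict_x[x] = "."
--             dict_y[y] = dict_x
--         dict_z[z] = dict_y
--
--     return dict_z
-- ===== SOURCE B (Python) =====
-- from operator import itemgetter
--
-- def createSpaceWithActivePoint(list_active_point) :
--     x_min, x_max = min(list_active_point,key=itemgetter(0))[0], max(list_active_point,key=itemgetter(0))[0]
--     y_min, y_max = min(list_active_point,key=itemgetter(1))[1], max(list_active_point,key=itemgetter(1))[1]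
--     z_min, z_max = min(list_active_point,key=itemgetter(2))[2], max(list_active_point,key=itemgetter(2))[2]
--
--     # default-fill: the whole bounding box is inactive
--     dict_z = {z: {y: {x: "." for x in range(x_min, x_max + 1)}
--                   for y in range(y_min, y_max + 1)}
--               for z in range(z_min, z_max + 1)}
--
--     # scatter: mark only the active points
--     for (x, y, z) in list_active_point:
--         dict_z[z][y][x] = "#"
--
--     return dict_z
-- ===== Notes on version B (the rewrite author's own statement) =====
-- stated objective: alternative
-- what changed: A tests every cell of the bounding box for membership while building the nested dicts; B builds the whole box unconditionally filled with '.' via dict comprehensions and then does a second scatter pass writing '#' only at the active points.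
import Mathlib
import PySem

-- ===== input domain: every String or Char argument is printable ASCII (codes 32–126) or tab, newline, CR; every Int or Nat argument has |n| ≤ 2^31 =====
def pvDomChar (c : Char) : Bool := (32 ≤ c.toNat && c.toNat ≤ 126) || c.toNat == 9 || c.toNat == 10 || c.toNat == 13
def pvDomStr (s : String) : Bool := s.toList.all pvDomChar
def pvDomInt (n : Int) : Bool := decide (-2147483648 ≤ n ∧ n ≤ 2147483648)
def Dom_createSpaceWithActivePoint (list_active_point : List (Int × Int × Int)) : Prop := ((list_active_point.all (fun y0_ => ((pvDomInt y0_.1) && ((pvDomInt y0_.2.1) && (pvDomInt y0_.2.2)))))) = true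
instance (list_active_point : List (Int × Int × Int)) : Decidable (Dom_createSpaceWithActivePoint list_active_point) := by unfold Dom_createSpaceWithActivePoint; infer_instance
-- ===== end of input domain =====

-- B replaces A's per-cell membership branch by a default-fill of the whole box with "." followed by a
-- scatter pass writing "#" only at the active points (simpler decomposition; equal return value).

-- ===== PORT A =====
-- literal transliteration of A: three mins/maxes, then triple nested dict-building loop
-- with a membership test per cell; dicts are PySem.Dict, returned as their items lists.
def createSpaceWithActivePoint (list_active_point : List (Int × Int × Int)) :
    List (Int × List (Int × List (Int × String))) :=
  match PySem.List.min? list_active_point (fun p => p.1),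
        PySem.List.max? list_active_point (fun p => p.1),
        PySem.List.min? list_active_point (fun p => p.2.1),
        PySem.List.max? list_active_point (fun p => p.2.1),
        PySem.List.min? list_active_point (fun p => p.2.2),
        PySem.List.max? list_active_point (fun p => p.2.2) with
  | some pxn, some pxm, some pyn, some pym, some pzn, some pzm =>
      let x_min := pxn.1; let x_max := pxm.1
      let y_min := pyn.2.1; let y_max := pym.2.1
      let z_min := pzn.2.2; let z_max := pzm.2.2
      let dict_z : PySem.Dict Int (PySem.Dict Int (PySem.Dict Int String)) :=
        (PySem.List.pyRange z_min (z_max + 1) 1).foldl (fun dict_z z =>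
          let dict_y : PySem.Dict Int (PySem.Dict Int String) :=
            (PySem.List.pyRange y_min (y_max + 1) 1).foldl (fun dict_y y =>
              let dict_x : PySem.Dict Int String :=
                (PySem.List.pyRange x_min (x_max + 1) 1).foldl (fun dict_x x =>
                  if (x, y, z) ∈ list_active_point then dict_x.insert x "#"
                  else dict_x.insert x ".") PySem.Dict.empty
              dict_y.insert y dict_x) PySem.Dict.empty
          dict_z.insert z dict_y) PySem.Dict.empty
      dict_z.items.map (fun zp => (zp.1, zp.2.items.map (fun yp => (yp.1, yp.2.items))))
  | _, _, _, _, _, _ => []        -- unreachable under Pre_ (Python raises ValueError on [])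

-- ===== PORT B =====
-- literal transliteration of Source B: same mins/maxes, a dict comprehension filling the
-- whole box with ".", then a scatter loop over the active points writing "#".
def createSpaceWithActivePoint_alt (list_active_point : List (Int × Int × Int)) :
    List (Int × List (Int × List (Int × String))) :=
  -- min/max of [] raise ValueError in Python; Pre_ excludes []; the .getD default is never used under Pre_
  let pxn := (PySem.List.min? list_active_point (fun p => p.1)).getD (0, 0, 0)
  let pxm := (PySem.List.max? list_active_point (fun p => p.1)).getD (0, 0, 0)
  let pyn := (PySem.List.min? list_active_point (fun p => p.2.1)).getD (0, 0, 0)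
  let pym := (PySem.List.max? list_active_point (fun p => p.2.1)).getD (0, 0, 0)
  let pzn := (PySem.List.min? list_active_point (fun p => p.2.2)).getD (0, 0, 0)
  let pzm := (PySem.List.max? list_active_point (fun p => p.2.2)).getD (0, 0, 0)
  let x_min := pxn.1; let x_max := pxm.1
  let y_min := pyn.2.1; let y_max := pym.2.1
  let z_min := pzn.2.2; let z_max := pzm.2.2
  let dict_z : PySem.Dict Int (PySem.Dict Int (PySem.Dict Int String)) :=
    PySem.Dict.ofList ((PySem.List.pyRange z_min (z_max + 1) 1).map (fun z =>
      (z, PySem.Dict.ofList ((PySem.List.pyRange y_min (y_max + 1) 1).map (fun y =>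
        (y, PySem.Dict.ofList ((PySem.List.pyRange x_min (x_max + 1) 1).map (fun x =>
          (x, ("." : String))))))))))
  let dict_z := list_active_point.foldl (fun dict_z p =>
    -- dict_z[z][y][x] = "#"; the key is always present, so 'modify' = Python's read-then-assign
    dict_z.modify p.2.2 PySem.Dict.empty (fun dict_y =>
      dict_y.modify p.2.1 PySem.Dict.empty (fun dict_x =>
        dict_x.insert p.1 "#"))) dict_z
  dict_z.items.map (fun zp => (zp.1, zp.2.items.map (fun yp => (yp.1, yp.2.items))))

-- ===== PRECONDITION & SPEC =====
-- Pre_ excludes only the empty list, on which both Pythons raise ValueError (min of empty sequence).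
def Pre_createSpaceWithActivePoint (list_active_point : List (Int × Int × Int)) : Prop :=
  list_active_point ≠ []
instance (list_active_point : List (Int × Int × Int)) : Decidable (Pre_createSpaceWithActivePoint list_active_point) := by unfold Pre_createSpaceWithActivePoint; infer_instance
def pvWitness_createSpaceWithActivePoint : (List (Int × Int × Int)) := [(0, 0, 0), (1, 0, -1)]
def Spec_createSpaceWithActivePoint (list_active_point : List (Int × Int × Int)) (out : List (Int × List (Int × List (Int × String)))) : Prop := out = createSpaceWithActivePoint_alt list_active_point
instance (list_active_point : List (Int × Int × Int)) (out : List (Int × List (Int × List (Int × String)))) : Decidable (Spec_createSpaceWithActivePoint list_active_point out) := by unfold Spec_createSpaceWithActivePoint; infer_instance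

-- ===== CLAIM (what is proved, stated in full; the proofs are below) =====
def Claim_equal_createSpaceWithActivePoint : Prop := ∀ (list_active_point : List (Int × Int × Int)), Dom_createSpaceWithActivePoint list_active_point → Pre_createSpaceWithActivePoint list_active_point → Spec_createSpaceWithActivePoint list_active_point (createSpaceWithActivePoint list_active_point)

-- ===== LEMMAS AND PROOFS =====

-- canonical value of one cell / row / plane / space of the grid, for active set S
def pvCell (S : List (Int × Int × Int)) (x y z : Int) : String :=
  if (x, y, z) ∈ S then "#" else "."
def pvRow (S : List (Int × Int × Int)) (xn xm y z : Int) : PySem.Dict Int String :=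
  ⟨(PySem.List.pyRange xn (xm + 1) 1).map (fun x => (x, pvCell S x y z))⟩
def pvPlane (S : List (Int × Int × Int)) (xn xm yn ym z : Int) : PySem.Dict Int (PySem.Dict Int String) :=
  ⟨(PySem.List.pyRange yn (ym + 1) 1).map (fun y => (y, pvRow S xn xm y z))⟩
def pvSpace (S : List (Int × Int × Int)) (xn xm yn ym zn zm : Int) : PySem.Dict Int (PySem.Dict Int (PySem.Dict Int String)) :=
  ⟨(PySem.List.pyRange zn (zm + 1) 1).map (fun z => (z, pvPlane S xn xm yn ym z))⟩

theorem pv_nodup_pyRange (a b : Int) : (PySem.List.pyRange a b 1).Nodup := by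
  have h : ∀ n : Nat, ∀ a : Int, b - a ≤ n → (PySem.List.pyRange a b 1).Nodup := by
    intro n
    induction n with
    | zero =>
      intro a ha
      have hnil : PySem.List.pyRange a b 1 = [] := by
        rw [List.eq_nil_iff_forall_not_mem]
        intro x hx
        rw [PySem.List.mem_pyRange_one] at hx
        omega
      simp [hnil]
    | succ n ih =>
      intro a ha
      by_cases hab : a < b
      · rw [PySem.List.pyRange_one_cons hab]
        refine List.nodup_cons.mpr ⟨?_, ih (a + 1) (by omega)⟩
        intro hmem
        rw [PySem.List.mem_pyRange_one] at hmem
        omega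
      · have hnil : PySem.List.pyRange a b 1 = [] := by
          rw [List.eq_nil_iff_forall_not_mem]
          intro x hx
          rw [PySem.List.mem_pyRange_one] at hx
          omega
        simp [hnil]
  exact h (b - a).toNat a (by omega)

-- a fold of inserts of distinct fresh keys, and a dict built from distinct keys, are literal item lists
theorem pvFoldl_insert_map {ν : Type} (l : List Int) (hl : l.Nodup) (g : Int → ν) :
    l.foldl (fun d x => d.insert x (g x)) PySem.Dict.empty = ⟨l.map (fun x => (x, g x))⟩ := by
  apply PySem.Dict.ext
  have h := PySem.Dict.items_foldl_insert_fresh l (fun x => x) g PySem.Dict.empty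
      (fun a _ => PySem.Dict.contains_empty _) (by simpa using hl)
  simpa using h

theorem pvOfList_nodup {ν : Type} (l : List (Int × ν)) (hl : (l.map Prod.fst).Nodup) :
    PySem.Dict.ofList l = ⟨l⟩ := by
  apply PySem.Dict.ext
  unfold PySem.Dict.ofList PySem.Dict.update
  have h := PySem.Dict.items_foldl_insert_fresh l Prod.fst Prod.snd
      PySem.Dict.empty (fun a _ => PySem.Dict.contains_empty _) hl
  simpa using h

theorem pvNodupFst {ν : Type} (l : List Int) (g : Int → ν) (hl : l.Nodup) :
    ((l.map (fun x => (x, g x))).map Prod.fst).Nodup := by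
  simpa [List.map_map, Function.comp_def] using hl

-- A's three nested loops build exactly the canonical space for active set L
theorem pvA_row (L : List (Int × Int × Int)) (xn xm y z : Int) :
    (PySem.List.pyRange xn (xm + 1) 1).foldl (fun dx x =>
        if (x, y, z) ∈ L then dx.insert x "#" else dx.insert x ".") PySem.Dict.empty
      = pvRow L xn xm y z := by
  have hf : (fun (dx : PySem.Dict Int String) x =>
      if (x, y, z) ∈ L then dx.insert x "#" else dx.insert x ".")
      = fun dx x => dx.insert x (pvCell L x y z) := by
    funext dx x
    unfold pvCell
    split <;> rfl
  rw [hf]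
  exact pvFoldl_insert_map _ (pv_nodup_pyRange _ _) _

theorem pvA_plane (L : List (Int × Int × Int)) (xn xm yn ym z : Int) :
    (PySem.List.pyRange yn (ym + 1) 1).foldl (fun dy y =>
        dy.insert y ((PySem.List.pyRange xn (xm + 1) 1).foldl (fun dx x =>
          if (x, y, z) ∈ L then dx.insert x "#" else dx.insert x ".") PySem.Dict.empty)) PySem.Dict.empty
      = pvPlane L xn xm yn ym z := by
  simp only [pvA_row]
  exact pvFoldl_insert_map _ (pv_nodup_pyRange _ _) _

theorem pvA_space (L : List (Int × Int × Int)) (xn xm yn ym zn zm : Int) :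
    (PySem.List.pyRange zn (zm + 1) 1).foldl (fun dz z =>
        dz.insert z ((PySem.List.pyRange yn (ym + 1) 1).foldl (fun dy y =>
          dy.insert y ((PySem.List.pyRange xn (xm + 1) 1).foldl (fun dx x =>
            if (x, y, z) ∈ L then dx.insert x "#" else dx.insert x ".") PySem.Dict.empty)) PySem.Dict.empty)) PySem.Dict.empty
      = pvSpace L xn xm yn ym zn zm := by
  simp only [pvA_plane]
  exact pvFoldl_insert_map _ (pv_nodup_pyRange _ _) _

-- B's comprehension is the canonical space for the empty active set
theorem pvB_row (xn xm y z : Int) :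
    PySem.Dict.ofList ((PySem.List.pyRange xn (xm + 1) 1).map (fun x => (x, ("." : String))))
      = pvRow [] xn xm y z := by
  rw [pvOfList_nodup _ (pvNodupFst _ _ (pv_nodup_pyRange xn (xm + 1)))]
  unfold pvRow pvCell
  simp

theorem pvB_grid (xn xm yn ym zn zm : Int) :
    PySem.Dict.ofList ((PySem.List.pyRange zn (zm + 1) 1).map (fun z =>
        (z, PySem.Dict.ofList ((PySem.List.pyRange yn (ym + 1) 1).map (fun y =>
          (y, PySem.Dict.ofList ((PySem.List.pyRange xn (xm + 1) 1).map (fun x =>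
            (x, ("." : String))))))))))
      = pvSpace [] xn xm yn ym zn zm := by
  rw [pvOfList_nodup _ (pvNodupFst _ _ (pv_nodup_pyRange zn (zm + 1)))]
  unfold pvSpace
  congr 1
  apply List.map_congr_left
  intro z _
  congr 1
  rw [pvOfList_nodup _ (pvNodupFst _ _ (pv_nodup_pyRange yn (ym + 1)))]
  unfold pvPlane
  congr 1
  apply List.map_congr_left
  intro y _
  congr 1
  exact pvB_row xn xm y z

-- cells outside the written point are unchanged by appending it
theorem pvCell_append_ne (S : List (Int × Int × Int)) (p : Int × Int × Int) (x y z : Int)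
    (h : (x, y, z) ≠ p) : pvCell (S ++ [p]) x y z = pvCell S x y z := by
  unfold pvCell
  simp [List.mem_append, h]

theorem pvRow_append_ne_z (S : List (Int × Int × Int)) (p : Int × Int × Int) (xn xm y z : Int)
    (h : z ≠ p.2.2 ∨ y ≠ p.2.1) : pvRow (S ++ [p]) xn xm y z = pvRow S xn xm y z := by
  unfold pvRow
  congr 1
  apply List.map_congr_left
  intro x _
  have hne : (x, y, z) ≠ p := by
    intro he
    rcases h with h | h
    · exact h (by rw [← he])
    · exact h (by rw [← he])
  rw [pvCell_append_ne S p x y z hne]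

theorem pvPlane_append_ne_z (S : List (Int × Int × Int)) (p : Int × Int × Int) (xn xm yn ym z : Int)
    (h : z ≠ p.2.2) : pvPlane (S ++ [p]) xn xm yn ym z = pvPlane S xn xm yn ym z := by
  unfold pvPlane
  congr 1
  apply List.map_congr_left
  intro y _
  rw [pvRow_append_ne_z S p xn xm y z (Or.inl h)]

-- one scatter write turns canonical-for-S into canonical-for-(S ++ [p])
theorem pvStep_row (S : List (Int × Int × Int)) (p : Int × Int × Int) (xn xm : Int)
    (hx : xn ≤ p.1 ∧ p.1 ≤ xm) :
    (pvRow S xn xm p.2.1 p.2.2).insert p.1 "#" = pvRow (S ++ [p]) xn xm p.2.1 p.2.2 := by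
  have hc : (pvRow S xn xm p.2.1 p.2.2).contains p.1 = true := by
    rw [PySem.Dict.contains_iff_mem_keys]
    unfold pvRow
    simp [PySem.Dict.keys_mk, List.map_map, Function.comp, PySem.List.mem_pyRange_one]
    omega
  apply PySem.Dict.ext
  rw [PySem.Dict.items_insert_of_contains _ _ hc]
  unfold pvRow
  simp only [List.map_map]
  apply List.map_congr_left
  intro x hx
  simp only [Function.comp]
  by_cases hxp : x = p.1
  · subst hxp
    simp only [beq_self_eq_true, if_true]
    unfold pvCell
    have hmem : ((p.1 : Int), p.2.1, p.2.2) ∈ S ++ [p] := by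
      simp [Prod.mk.eta]
    rw [if_pos hmem]
  · have : (x == p.1) = false := by simp [hxp]
    simp only [this, Bool.false_eq_true, if_false]
    have hne : (x, p.2.1, p.2.2) ≠ p := by
      intro he
      apply hxp
      have := congrArg Prod.fst he
      simpa using this
    rw [pvCell_append_ne S p x p.2.1 p.2.2 hne]

theorem pvStep_plane (S : List (Int × Int × Int)) (p : Int × Int × Int) (xn xm yn ym : Int)
    (hx : xn ≤ p.1 ∧ p.1 ≤ xm) (hy : yn ≤ p.2.1 ∧ p.2.1 ≤ ym) :
    (pvPlane S xn xm yn ym p.2.2).modify p.2.1 PySem.Dict.empty (fun dx => dx.insert p.1 "#")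
      = pvPlane (S ++ [p]) xn xm yn ym p.2.2 := by
  have hyR : p.2.1 ∈ PySem.List.pyRange yn (ym + 1) 1 := by
    rw [PySem.List.mem_pyRange_one]; omega
  have hnd : (pvPlane S xn xm yn ym p.2.2).keys.Nodup := by
    unfold pvPlane
    simpa [PySem.Dict.keys_mk, List.map_map, Function.comp_def] using pv_nodup_pyRange yn (ym + 1)
  have hget : (pvPlane S xn xm yn ym p.2.2).getD p.2.1 PySem.Dict.empty
      = pvRow S xn xm p.2.1 p.2.2 := by
    apply PySem.Dict.getD_of_mem_items _ _ hnd
    unfold pvPlane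
    exact List.mem_map.mpr ⟨p.2.1, hyR, rfl⟩
  have hc : (pvPlane S xn xm yn ym p.2.2).contains p.2.1 = true := by
    rw [PySem.Dict.contains_iff_mem_keys]
    unfold pvPlane
    simp only [PySem.Dict.keys_mk, List.map_map]
    simpa using hyR
  unfold PySem.Dict.modify
  rw [hget]
  have hrow := pvStep_row S p xn xm hx
  simp only [hrow]
  apply PySem.Dict.ext
  rw [PySem.Dict.items_insert_of_contains _ _ hc]
  unfold pvPlane
  simp only [List.map_map]
  apply List.map_congr_left
  intro y hy
  simp only [Function.comp]
  by_cases hyp : y = p.2.1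
  · subst hyp
    simp
  · have : (y == p.2.1) = false := by simp [hyp]
    simp only [this, Bool.false_eq_true, if_false]
    rw [pvRow_append_ne_z S p xn xm y p.2.2 (Or.inr hyp)]

theorem pvStep_space (S : List (Int × Int × Int)) (p : Int × Int × Int) (xn xm yn ym zn zm : Int)
    (hx : xn ≤ p.1 ∧ p.1 ≤ xm) (hy : yn ≤ p.2.1 ∧ p.2.1 ≤ ym) (hz : zn ≤ p.2.2 ∧ p.2.2 ≤ zm) :
    (pvSpace S xn xm yn ym zn zm).modify p.2.2 PySem.Dict.empty (fun dy =>
        dy.modify p.2.1 PySem.Dict.empty (fun dx => dx.insert p.1 "#"))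
      = pvSpace (S ++ [p]) xn xm yn ym zn zm := by
  have hzR : p.2.2 ∈ PySem.List.pyRange zn (zm + 1) 1 := by
    rw [PySem.List.mem_pyRange_one]; omega
  have hnd : (pvSpace S xn xm yn ym zn zm).keys.Nodup := by
    unfold pvSpace
    simpa [PySem.Dict.keys_mk, List.map_map, Function.comp_def] using pv_nodup_pyRange zn (zm + 1)
  have hget : (pvSpace S xn xm yn ym zn zm).getD p.2.2 PySem.Dict.empty
      = pvPlane S xn xm yn ym p.2.2 := by
    apply PySem.Dict.getD_of_mem_items _ _ hnd
    unfold pvSpace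
    exact List.mem_map.mpr ⟨p.2.2, hzR, rfl⟩
  have hc : (pvSpace S xn xm yn ym zn zm).contains p.2.2 = true := by
    rw [PySem.Dict.contains_iff_mem_keys]
    unfold pvSpace
    simp only [PySem.Dict.keys_mk, List.map_map]
    simpa using hzR
  conv_lhs => rw [PySem.Dict.modify]
  rw [hget]
  have hplane := pvStep_plane S p xn xm yn ym hx hy
  simp only [hplane]
  apply PySem.Dict.ext
  rw [PySem.Dict.items_insert_of_contains _ _ hc]
  unfold pvSpace
  simp only [List.map_map]
  apply List.map_congr_left
  intro z hz
  simp only [Function.comp]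
  by_cases hzp : z = p.2.2
  · subst hzp
    simp
  · have : (z == p.2.2) = false := by simp [hzp]
    simp only [this, Bool.false_eq_true, if_false]
    rw [pvPlane_append_ne_z S p xn xm yn ym z hzp]

theorem pvScatter (pts S : List (Int × Int × Int)) (xn xm yn ym zn zm : Int)
    (h : ∀ p ∈ pts, (xn ≤ p.1 ∧ p.1 ≤ xm) ∧ (yn ≤ p.2.1 ∧ p.2.1 ≤ ym) ∧ (zn ≤ p.2.2 ∧ p.2.2 ≤ zm)) :
    pts.foldl (fun dz p =>
        dz.modify p.2.2 PySem.Dict.empty (fun dy =>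
          dy.modify p.2.1 PySem.Dict.empty (fun dx => dx.insert p.1 "#")))
      (pvSpace S xn xm yn ym zn zm)
      = pvSpace (S ++ pts) xn xm yn ym zn zm := by
  induction pts generalizing S with
  | nil => simp
  | cons p rest ih =>
    simp only [List.foldl_cons]
    rw [pvStep_space S p xn xm yn ym zn zm (h p (by simp)).1 (h p (by simp)).2.1
        (h p (by simp)).2.2]
    rw [ih (S ++ [p]) (fun q hq => h q (by simp [hq]))]
    simp

-- ===== VERDICT (by name: the statement is the Claim_ definition above) =====
theorem createSpaceWithActivePoint_spec : Claim_equal_createSpaceWithActivePoint := by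
  intro L hDom hPre
  unfold Spec_createSpaceWithActivePoint
  have hxn' : PySem.List.min? L (fun p => p.1) ≠ none :=
    fun h => hPre ((PySem.List.min?_eq_none_iff L _).mp h)
  have hxm' : PySem.List.max? L (fun p => p.1) ≠ none :=
    fun h => hPre ((PySem.List.max?_eq_none_iff L _).mp h)
  have hyn' : PySem.List.min? L (fun p => p.2.1) ≠ none :=
    fun h => hPre ((PySem.List.min?_eq_none_iff L _).mp h)
  have hym' : PySem.List.max? L (fun p => p.2.1) ≠ none :=
    fun h => hPre ((PySem.List.max?_eq_none_iff L _).mp h)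
  have hzn' : PySem.List.min? L (fun p => p.2.2) ≠ none :=
    fun h => hPre ((PySem.List.min?_eq_none_iff L _).mp h)
  have hzm' : PySem.List.max? L (fun p => p.2.2) ≠ none :=
    fun h => hPre ((PySem.List.max?_eq_none_iff L _).mp h)
  obtain ⟨pxn, hxn⟩ := Option.ne_none_iff_exists'.mp hxn'
  obtain ⟨pxm, hxm⟩ := Option.ne_none_iff_exists'.mp hxm'
  obtain ⟨pyn, hyn⟩ := Option.ne_none_iff_exists'.mp hyn'
  obtain ⟨pym, hym⟩ := Option.ne_none_iff_exists'.mp hym'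
  obtain ⟨pzn, hzn⟩ := Option.ne_none_iff_exists'.mp hzn'
  obtain ⟨pzm, hzm⟩ := Option.ne_none_iff_exists'.mp hzm'
  have hb : ∀ q ∈ L, (pxn.1 ≤ q.1 ∧ q.1 ≤ pxm.1) ∧ (pyn.2.1 ≤ q.2.1 ∧ q.2.1 ≤ pym.2.1) ∧
      (pzn.2.2 ≤ q.2.2 ∧ q.2.2 ≤ pzm.2.2) := by
    intro q hq
    exact ⟨⟨PySem.List.min?_isMin hxn q hq, PySem.List.max?_isMax hxm q hq⟩,
      ⟨PySem.List.min?_isMin hyn q hq, PySem.List.max?_isMax hym q hq⟩,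
      ⟨PySem.List.min?_isMin hzn q hq, PySem.List.max?_isMax hzm q hq⟩⟩
  unfold createSpaceWithActivePoint createSpaceWithActivePoint_alt
  rw [hxn, hxm, hyn, hym, hzn, hzm]
  dsimp only
  rw [pvA_space, pvB_grid]
  simp only [Option.getD_some]
  rw [pvScatter L [] _ _ _ _ _ _ hb]
  simp
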